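-- pv_equiv track=rewrite | github.com/aebeltran13/codewars | 6kyu/The OR sum.py | or_sum
-- ===== SOURCE A (Python) =====
-- def or_sum(n: int) -> int:
--   result = 0
--   bit_position = 0
--
--   while n > 0:
--       # Count the number of set bits at the current position
--       count_set_bits = (n + 1) // 2
--
--       # Add the contribution of the current position to the result
--       result += count_set_bits * (1 << bit_position)
--
--       # Move to the next bit position
--       bit_position += 1
--       n //= 2
--
--   return result
-- ===== SOURCE B (Python) =====
-- def or_sum(n: int) -> int:
--     if n <= 0:
--         return 0
--     return (n + 1) // 2 + 2 * or_sum(n // 2)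
-- ===== Notes on version B (the rewrite author's own statement) =====
-- stated objective: alternative
-- what changed: Replaces A's iterative loop with mutable result/bit_position accumulators by a stateless divide-and-conquer recurrence or_sum(n) = (n+1)//2 + 2*or_sum(n//2).
import Mathlib
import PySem

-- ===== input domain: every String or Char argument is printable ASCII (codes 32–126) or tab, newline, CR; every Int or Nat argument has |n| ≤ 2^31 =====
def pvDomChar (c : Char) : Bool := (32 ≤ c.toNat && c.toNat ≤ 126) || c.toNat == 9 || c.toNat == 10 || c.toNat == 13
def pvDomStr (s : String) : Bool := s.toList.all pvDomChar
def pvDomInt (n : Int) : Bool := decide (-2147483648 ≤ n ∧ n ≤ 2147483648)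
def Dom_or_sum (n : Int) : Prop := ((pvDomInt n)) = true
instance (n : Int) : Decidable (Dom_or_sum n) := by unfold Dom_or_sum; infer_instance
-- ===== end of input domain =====

-- B replaces A's iterative accumulator/bit-position loop by a stateless recurrence; same return value, same cost.

-- ===== PORT A =====
-- the while-loop of A, with its state (result, bit_position) carried as arguments
def or_sum_aux (n result : Int) (bp : Nat) : Int :=
  if h : n > 0 then
    or_sum_aux (PySem.Int.floordiv n 2)
      (result + PySem.Int.floordiv (n + 1) 2 * ((1 : Int) <<< bp)) (bp + 1)
  else result
termination_by n.toNat
decreasing_by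
  rw [PySem.Int.floordiv_eq_ediv_of_pos (by omega)]; omega

def or_sum (n : Int) : Int := or_sum_aux n 0 0

-- ===== PORT B =====
def or_sum_alt (n : Int) : Int :=
  if _h : n ≤ 0 then 0
  else PySem.Int.floordiv (n + 1) 2 + 2 * or_sum_alt (PySem.Int.floordiv n 2)
termination_by n.toNat
decreasing_by
  rw [PySem.Int.floordiv_eq_ediv_of_pos (by omega)]; omega

-- ===== PRECONDITION & SPEC =====
def Spec_or_sum (n : Int) (out : Int) : Prop := out = or_sum_alt n
instance (n : Int) (out : Int) : Decidable (Spec_or_sum n out) := by unfold Spec_or_sum; infer_instance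

-- ===== CLAIM (what is proved, stated in full; the proofs are below) =====
def Claim_equal_or_sum : Prop := ∀ (n : Int), Dom_or_sum n → Spec_or_sum n (or_sum n)

-- ===== LEMMAS AND PROOFS =====
lemma one_shiftLeft_int (k : Nat) : ((1 : Int) <<< k) = 2 ^ k := by
  simp [Int.shiftLeft_eq]

lemma or_sum_aux_eq (n result : Int) (bp : Nat) :
    or_sum_aux n result bp = result + 2 ^ bp * or_sum_alt n := by
  induction n, result, bp using or_sum_aux.induct with
  | case1 n r bp h ih =>
    have halt : or_sum_alt n
        = PySem.Int.floordiv (n + 1) 2 + 2 * or_sum_alt (PySem.Int.floordiv n 2) := by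
      rw [or_sum_alt, dif_neg (by omega : ¬ n ≤ 0)]
    rw [or_sum_aux, dif_pos h, ih, halt, one_shiftLeft_int]
    ring
  | case2 n r bp h =>
    rw [or_sum_aux, dif_neg h, or_sum_alt, dif_pos (by omega : n ≤ 0)]
    ring

-- ===== VERDICT (by name: the statement is the Claim_ definition above) =====
theorem or_sum_spec : Claim_equal_or_sum := by
  intro n _
  unfold Spec_or_sum or_sum
  rw [or_sum_aux_eq]
  ring
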